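-- pv_equiv track=rewrite | github.com/JiangLab2020/DeepCodon | RareCodon/src/attached_code/misc_code.py | vector_with_slidingWindow
-- ===== SOURCE A (Python) =====
-- def vector_with_slidingWindow(vector, sliding_window=5):
--     length = len(vector)
--     result = []
--
--     for i in range(length):
--         start = max(0, i - sliding_window // 2)
--         end = min(length, i + sliding_window // 2 + 1)
--         window = vector[start:end]
--         majority = 0
--         for w in window:
--             if w == "1":
--                 majority += 1
--         majority = str(majority)
--         result.append(majority)
--     return "".join(result)
-- ===== SOURCE B (Python) =====
-- def vector_with_slidingWindow(vector, sliding_window=5):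
--     """O(n): prefix sums of '1'-counts; each window count is one subtraction."""
--     n = len(vector)
--     h = sliding_window // 2
--     prefix = [0]
--     for v in vector:
--         prefix.append(prefix[-1] + (v == "1"))
--     return "".join(
--         str(prefix[min(n, i + h + 1)] - prefix[max(0, i - h)]) for i in range(n)
--     )
-- ===== Notes on version B (the rewrite author's own statement) =====
-- stated objective: faster
-- what changed: Replaces A's inner per-window rescan (slice and count for every position) with a prefix-sum array of '1'-counts built in one pass, so each window count is a single subtraction; Pre_ excludes negative sliding_window, where A's window bounds turn into accidental Python negative-slice wraparound.
-- outside the precondition, e.g. on vector_with_slidingWindow(['1', '0', '1'], -5): A returns '000', B raises IndexError; on vector_with_slidingWindow(['1', '1'], -1): A returns '00', B returns '-1-1'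
import Mathlib
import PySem

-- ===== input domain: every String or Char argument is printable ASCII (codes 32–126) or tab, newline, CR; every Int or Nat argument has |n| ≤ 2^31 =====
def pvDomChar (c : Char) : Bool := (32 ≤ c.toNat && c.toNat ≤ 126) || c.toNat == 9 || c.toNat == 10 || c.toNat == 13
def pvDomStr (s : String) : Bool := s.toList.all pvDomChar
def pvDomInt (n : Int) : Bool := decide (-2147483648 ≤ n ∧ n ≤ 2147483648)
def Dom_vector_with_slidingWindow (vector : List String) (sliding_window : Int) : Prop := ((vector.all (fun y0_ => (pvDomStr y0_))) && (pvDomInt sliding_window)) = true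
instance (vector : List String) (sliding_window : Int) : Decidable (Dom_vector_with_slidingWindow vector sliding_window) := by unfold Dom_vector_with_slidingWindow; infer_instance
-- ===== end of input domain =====

-- B computes the per-position window counts from a prefix-sum array of '1'-counts
-- (objective: faster, one subtraction per position instead of rescanning the window).

-- ===== PORT A =====
def vector_with_slidingWindow (vector : List String) (sliding_window : Int) : String :=
  let length : Int := vector.length
  let result := (PySem.List.pyRange 0 length 1).foldl (fun result i =>
    let start := max 0 (i - PySem.Int.floordiv sliding_window 2)
    let stop := min length (i + PySem.Int.floordiv sliding_window 2 + 1)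
    let window := PySem.List.slice vector (some start) (some stop)
    let majority := window.foldl (fun m w => if w = "1" then m + 1 else m) (0 : Int)
    result ++ [PySem.Int.toStr majority]) []
  PySem.Str.join "" result

-- ===== PORT B =====
def vector_with_slidingWindow_alt (vector : List String) (sliding_window : Int) : String :=
  let n : Int := vector.length
  let h := PySem.Int.floordiv sliding_window 2
  let pfx := vector.foldl
    (fun p v => p ++ [PySem.List.pyGetD p (-1) 0 + (if v = "1" then (1 : Int) else 0)]) [(0 : Int)]
  let out := (PySem.List.pyRange 0 n 1).map (fun i =>
    PySem.Int.toStr (PySem.List.pyGetD pfx (min n (i + h + 1)) 0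
                     - PySem.List.pyGetD pfx (max 0 (i - h)) 0))
  PySem.Str.join "" out

-- ===== PRECONDITION & SPEC =====
-- Pre_ excludes negative sliding_window (a window of negative width), on which A's
-- slice bounds go negative and its output is an accident of Python's negative-slice
-- wraparound; B's prefix-sum indexing naturally raises or differs there.
def Pre_vector_with_slidingWindow (vector : List String) (sliding_window : Int) : Prop :=
  0 ≤ sliding_window
instance (vector : List String) (sliding_window : Int) : Decidable (Pre_vector_with_slidingWindow vector sliding_window) := by unfold Pre_vector_with_slidingWindow; infer_instance
def pvWitness_vector_with_slidingWindow : List String × Int := (["1", "0", "1", "1"], 3)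

def Spec_vector_with_slidingWindow (vector : List String) (sliding_window : Int) (out : String) : Prop := out = vector_with_slidingWindow_alt vector sliding_window
instance (vector : List String) (sliding_window : Int) (out : String) : Decidable (Spec_vector_with_slidingWindow vector sliding_window out) := by unfold Spec_vector_with_slidingWindow; infer_instance

-- ===== CLAIM (what is proved, stated in full; the proofs are below) =====
def Claim_equal_vector_with_slidingWindow : Prop := ∀ (vector : List String) (sliding_window : Int), Dom_vector_with_slidingWindow vector sliding_window → Pre_vector_with_slidingWindow vector sliding_window → Spec_vector_with_slidingWindow vector sliding_window (vector_with_slidingWindow vector sliding_window)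

-- ===== LEMMAS AND PROOFS =====

/-- Count of `"1"` entries, as an integer. -/
def pvCnt (l : List String) : Int := (l.countP (fun w => w == "1") : Int)

lemma pvCnt_loop (l : List String) (a : Int) :
    l.foldl (fun m w => if w = "1" then m + 1 else m) a = a + pvCnt l := by
  have hfun : (fun (m : Int) w => if w = "1" then m + 1 else m)
      = (fun (m : Int) w => if (fun w => w == "1") w = true then m + 1 else m) := by
    funext m w; simp
  rw [hfun, PySem.List.foldl_count_if]
  rfl

lemma pvCnt_cons (v : String) (t : List String) :
    pvCnt (v :: t) = (if v = "1" then 1 else 0) + pvCnt t := by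
  by_cases hv : v = "1" <;> · simp [pvCnt, hv]; try ring

lemma pvCnt_append (a b : List String) : pvCnt (a ++ b) = pvCnt a + pvCnt b := by
  simp [pvCnt, List.countP_append]

/-- The prefix-building loop of B, characterised. -/
lemma pfx_aux (l : List String) : ∀ (acc : List Int) (hne : acc ≠ []),
    l.foldl (fun p v => p ++ [PySem.List.pyGetD p (-1) 0 + (if v = "1" then (1 : Int) else 0)]) acc
      = acc ++ (List.range l.length).map (fun k => acc.getLast hne + pvCnt (l.take (k + 1))) := by
  induction l with
  | nil => intro acc hne; simp
  | cons v t ih =>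
    intro acc hne
    have hne' : acc ++ [acc.getLast hne + (if v = "1" then (1 : Int) else 0)] ≠ [] := by simp
    simp only [List.foldl_cons, PySem.List.pyGetD_neg_one acc 0 hne]
    rw [ih _ hne']
    rw [show (acc ++ [acc.getLast hne + (if v = "1" then (1 : Int) else 0)]).getLast hne'
        = acc.getLast hne + (if v = "1" then (1 : Int) else 0) by simp]
    rw [List.length_cons, List.range_succ_eq_map, List.map_cons, List.map_map]
    rw [show (List.range t.length).map
          ((fun k => acc.getLast hne + pvCnt ((v :: t).take (k + 1))) ∘ Nat.succ)
        = (List.range t.length).map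
          (fun k => (acc.getLast hne + (if v = "1" then (1 : Int) else 0)) + pvCnt (t.take (k + 1))) by
      refine List.map_congr_left ?_
      intro k _
      simp only [Function.comp_apply, Nat.succ_eq_add_one, List.take_succ_cons, pvCnt_cons]
      ring]
    rw [show pvCnt ((v :: t).take (0 + 1)) = (if v = "1" then (1 : Int) else 0) by
      by_cases hv : v = "1" <;> simp [pvCnt, hv]]
    simp

lemma pfx_eq (vector : List String) :
    vector.foldl (fun p v => p ++ [PySem.List.pyGetD p (-1) 0 + (if v = "1" then (1 : Int) else 0)]) [(0 : Int)]
      = (List.range (vector.length + 1)).map (fun k => pvCnt (vector.take k)) := by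
  rw [pfx_aux vector [(0 : Int)] (by simp)]
  rw [List.range_succ_eq_map, List.map_cons, List.map_map]
  rw [show (List.range vector.length).map ((fun k => pvCnt (vector.take k)) ∘ Nat.succ)
      = (List.range vector.length).map
        (fun k => [(0 : Int)].getLast (by simp) + pvCnt (vector.take (k + 1))) by
    refine List.map_congr_left ?_
    intro k _
    simp]
  simp [pvCnt]

lemma pfx_getD (vector : List String) (k : Nat) (hk : k ≤ vector.length) :
    PySem.List.pyGetD
      (vector.foldl (fun p v => p ++ [PySem.List.pyGetD p (-1) 0 + (if v = "1" then (1 : Int) else 0)]) [(0 : Int)])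
      (k : Int) 0 = pvCnt (vector.take k) := by
  rw [pfx_eq, PySem.List.pyGetD_natCast,
    PySem.List.getD_map_range _ _ _ _ (by omega)]

lemma cnt_slice (vector : List String) (a b : Int)
    (hab : PySem.List.clampIdx vector.length a ≤ PySem.List.clampIdx vector.length b) :
    pvCnt (PySem.List.slice vector (some a) (some b))
      = pvCnt (vector.take (PySem.List.clampIdx vector.length b))
        - pvCnt (vector.take (PySem.List.clampIdx vector.length a)) := by
  set sN := PySem.List.clampIdx vector.length a with hs
  set eN := PySem.List.clampIdx vector.length b with he
  have hslice : PySem.List.slice vector (some a) (some b) = (vector.drop sN).take (eN - sN) := by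
    simp [PySem.List.slice, ← hs, ← he]
  have htake : vector.take eN = vector.take sN ++ (vector.drop sN).take (eN - sN) := by
    rw [← List.take_add, Nat.add_sub_cancel' hab]
  rw [hslice, htake, pvCnt_append]
  ring

/-- Per-position equality of the two computed digit strings (for a nonnegative half-width). -/
lemma elem_eq (vector : List String) (h i : Int) (hh : 0 ≤ h)
    (hi0 : 0 ≤ i) (hin : i < (vector.length : Int)) :
    PySem.Int.toStr
      (List.foldl (fun m w => if w = "1" then m + 1 else m) 0
        (PySem.List.slice vector (some (max 0 (i - h)))
          (some (min ((vector.length : Int)) (i + h + 1))))) =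
    PySem.Int.toStr
      (PySem.List.pyGetD
          (List.foldl (fun p v => p ++ [PySem.List.pyGetD p (-1) 0 + if v = "1" then 1 else 0]) [0] vector)
          (min ((vector.length : Int)) (i + h + 1)) 0 -
        PySem.List.pyGetD
          (List.foldl (fun p v => p ++ [PySem.List.pyGetD p (-1) 0 + if v = "1" then 1 else 0]) [0] vector)
          (max 0 (i - h)) 0) := by
  set n : Int := (vector.length : Int) with hn
  set a : Int := max 0 (i - h) with ha
  set b : Int := min n (i + h + 1) with hb
  have ha0 : (0 : Int) ≤ a := le_max_left _ _
  have han : a ≤ n := by omega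
  have hb0 : (0 : Int) ≤ b := by omega
  have hbn : b ≤ n := min_le_left _ _
  have hsclamp : PySem.List.clampIdx vector.length a = a.toNat := by
    simp only [PySem.List.clampIdx]; split_ifs <;> omega
  have heclamp : PySem.List.clampIdx vector.length b = b.toNat := by
    simp only [PySem.List.clampIdx]; split_ifs <;> omega
  have hacast : a = ((a.toNat : Nat) : Int) := by omega
  have hbcast : b = ((b.toNat : Nat) : Int) := by omega
  rw [pvCnt_loop, zero_add]
  rw [cnt_slice vector a b (by rw [hsclamp, heclamp]; omega)]
  rw [hsclamp, heclamp]
  rw [show PySem.List.pyGetD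
        (List.foldl (fun p v => p ++ [PySem.List.pyGetD p (-1) 0 + if v = "1" then 1 else 0]) [0] vector) b 0
      = pvCnt (vector.take b.toNat) by
    rw [hbcast]; exact pfx_getD vector b.toNat (by omega)]
  rw [show PySem.List.pyGetD
        (List.foldl (fun p v => p ++ [PySem.List.pyGetD p (-1) 0 + if v = "1" then 1 else 0]) [0] vector) a 0
      = pvCnt (vector.take a.toNat) by
    rw [hacast]; exact pfx_getD vector a.toNat (by omega)]

-- ===== VERDICT (by name: the statement is the Claim_ definition above) =====
theorem vector_with_slidingWindow_spec : Claim_equal_vector_with_slidingWindow := by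
  intro vector sliding_window _ hpre
  have hh : 0 ≤ PySem.Int.floordiv sliding_window 2 := by
    by_cases hz : sliding_window = 0
    · simp [hz, PySem.Int.floordiv]
    · rw [PySem.Int.floordiv_eq_ediv_of_pos (by omega)]
      exact Int.ediv_nonneg hpre (by omega)
  unfold Spec_vector_with_slidingWindow vector_with_slidingWindow vector_with_slidingWindow_alt
  simp only [PySem.List.foldl_append_singleton_eq_map, List.nil_append]
  congr 1
  apply List.map_congr_left
  intro i hi
  rw [PySem.List.mem_pyRange_one] at hi
  exact elem_eq vector (PySem.Int.floordiv sliding_window 2) i hh hi.1 hi.2
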